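-- pv_equiv track=rewrite | github.com/sammanthp007/sticky_problems | no_of_sum_of_4_3_1_dp.py | sum_of_1_3_4
-- ===== SOURCE A (Python) =====
-- def sum_of_1_3_4(sum1):
--     if sum1 <= 0:
--         return 0
--     elif sum1 == 1:
--         return 1
--     elif sum1 == 2:
--         return 1
--     elif sum1 == 3:
--         return 2
--     elif sum1 == 4:
--         return 4
--     else:
--         return sum_of_1_3_4(sum1 - 1) + sum_of_1_3_4(sum1 - 3) + sum_of_1_3_4(sum1 - 4)
-- ===== SOURCE B (Python) =====
-- def sum_of_1_3_4(sum1):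
--     if sum1 <= 0:
--         return 0
--     # rolling window (dp[i-3], dp[i-2], dp[i-1], dp[i]), starting at i = 1
--     # with dp[0] = 1 and dp[k] = 0 for k < 0; dp[i] = dp[i-1] + dp[i-3] + dp[i-4]
--     a, b, c, d = 0, 0, 1, 1
--     for _ in range(sum1 - 1):
--         a, b, c, d = b, c, d, d + b + a
--     return d
-- ===== Notes on version B (the rewrite author's own statement) =====
-- stated objective: faster
-- what changed: Replaced the triple-branching exponential recursion by a bottom-up rolling-window DP dp[i]=dp[i-1]+dp[i-3]+dp[i-4] carrying only the last four values; intended as asymptotically faster — in a timing run A timed out at sizes where B returned instantly with the same value.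
import Mathlib
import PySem

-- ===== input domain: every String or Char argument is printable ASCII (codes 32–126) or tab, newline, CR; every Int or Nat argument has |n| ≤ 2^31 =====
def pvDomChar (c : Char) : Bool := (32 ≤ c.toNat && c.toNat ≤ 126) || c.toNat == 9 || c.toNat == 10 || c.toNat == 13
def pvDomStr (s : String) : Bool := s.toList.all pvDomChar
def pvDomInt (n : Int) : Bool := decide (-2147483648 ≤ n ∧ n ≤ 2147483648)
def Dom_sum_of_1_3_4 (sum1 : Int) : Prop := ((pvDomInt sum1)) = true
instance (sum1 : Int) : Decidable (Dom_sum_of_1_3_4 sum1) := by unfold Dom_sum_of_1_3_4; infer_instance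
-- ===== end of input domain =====

-- B replaces A's exponential triple recursion by a linear rolling-window DP; return values agree on all inputs.

-- ===== PORT A =====
def sum_of_1_3_4 (sum1 : Int) : Int :=
  if sum1 ≤ 0 then 0
  else if sum1 = 1 then 1
  else if sum1 = 2 then 1
  else if sum1 = 3 then 2
  else if sum1 = 4 then 4
  else sum_of_1_3_4 (sum1 - 1) + sum_of_1_3_4 (sum1 - 3) + sum_of_1_3_4 (sum1 - 4)
termination_by sum1.toNat
decreasing_by all_goals omega

-- ===== PORT B =====
def sum_of_1_3_4_alt (sum1 : Int) : Int :=
  if sum1 ≤ 0 then 0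
  else
    let st := (List.range (sum1 - 1).toNat).foldl
      (fun (st : Int × Int × Int × Int) _ =>
        (st.2.1, st.2.2.1, st.2.2.2, st.2.2.2 + st.2.1 + st.1))
      (0, 0, 1, 1)
    st.2.2.2

-- ===== PRECONDITION & SPEC =====
-- Pre_ excludes large sum1 on which the Python A exceeds CPython's recursion limit and raises
-- RecursionError (its recursion depth grows linearly with sum1, so sufficiently large sum1
-- exceeds the interpreter's limit; a small margin is kept for caller stack frames).
def Pre_sum_of_1_3_4 (sum1 : Int) : Prop := sum1 ≤ 995
instance (sum1 : Int) : Decidable (Pre_sum_of_1_3_4 sum1) := by unfold Pre_sum_of_1_3_4; infer_instance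
def pvWitness_sum_of_1_3_4 : Int := (7)

def Spec_sum_of_1_3_4 (sum1 : Int) (out : Int) : Prop := out = sum_of_1_3_4_alt sum1
instance (sum1 : Int) (out : Int) : Decidable (Spec_sum_of_1_3_4 sum1 out) := by unfold Spec_sum_of_1_3_4; infer_instance

-- ===== CLAIM (what is proved, stated in full; the proofs are below) =====
def Claim_equal_sum_of_1_3_4 : Prop := ∀ (sum1 : Int), Dom_sum_of_1_3_4 sum1 → Pre_sum_of_1_3_4 sum1 → Spec_sum_of_1_3_4 sum1 (sum_of_1_3_4 sum1)

-- ===== LEMMAS AND PROOFS =====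

-- reference sequence: P k = number of ordered 1/3/4-sums of (k - 2), shifted so the DP window starts cleanly
def P : Nat → Int
  | 0 => 0
  | 1 => 0
  | 2 => 1
  | 3 => 1
  | n + 4 => P (n + 3) + P (n + 1) + P n

lemma foldl_range_P (k : Nat) :
    (List.range k).foldl
      (fun (st : Int × Int × Int × Int) _ =>
        (st.2.1, st.2.2.1, st.2.2.2, st.2.2.2 + st.2.1 + st.1))
      (0, 0, 1, 1)
    = (P k, P (k + 1), P (k + 2), P (k + 3)) := by
  induction k with
  | zero => simp [P]
  | succ k ih =>
      rw [List.range_succ, List.foldl_append, ih]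
      simp [P]

lemma A_eq_P (n : Nat) : sum_of_1_3_4 (n : Int) = if n = 0 then 0 else P (n + 2) := by
  induction n using Nat.strong_induction_on with
  | _ n ih =>
    match n with
    | 0 => rw [sum_of_1_3_4]; norm_num
    | 1 => rw [sum_of_1_3_4]; norm_num [P]
    | 2 => rw [sum_of_1_3_4]; norm_num [P]
    | 3 => rw [sum_of_1_3_4]; norm_num [P]
    | 4 => rw [sum_of_1_3_4]; norm_num [P]
    | (m + 5) =>
      rw [sum_of_1_3_4]
      have h1 : ((m + 5 : Nat) : Int) - 1 = ((m + 4 : Nat) : Int) := by push_cast; ring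
      have h3 : ((m + 5 : Nat) : Int) - 3 = ((m + 2 : Nat) : Int) := by push_cast; ring
      have h4 : ((m + 5 : Nat) : Int) - 4 = ((m + 1 : Nat) : Int) := by push_cast; ring
      rw [if_neg (by push_cast; omega), if_neg (by push_cast; omega),
          if_neg (by push_cast; omega), if_neg (by push_cast; omega),
          if_neg (by push_cast; omega), h1, h3, h4,
          ih (m + 4) (by omega), ih (m + 2) (by omega), ih (m + 1) (by omega)]
      simp only [if_neg (by omega : ¬ m + 5 = 0), if_neg (by omega : ¬ m + 4 = 0),
        if_neg (by omega : ¬ m + 2 = 0), if_neg (by omega : ¬ m + 1 = 0)]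
      calc P (m + 4 + 2) + P (m + 2 + 2) + P (m + 1 + 2)
          = P (m + 3 + 3) + P (m + 3 + 1) + P (m + 3) := by norm_num
        _ = P (m + 3 + 4) := (P.eq_5 (m + 3)).symm
        _ = P (m + 5 + 2) := by norm_num

-- ===== VERDICT (by name: the statement is the Claim_ definition above) =====
theorem sum_of_1_3_4_spec : Claim_equal_sum_of_1_3_4 := by
  intro sum1 _ _
  unfold Spec_sum_of_1_3_4 sum_of_1_3_4_alt
  by_cases h : sum1 ≤ 0
  · rw [if_pos h, sum_of_1_3_4, if_pos h]
  · rw [if_neg h]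
    have hn : sum1 = ((sum1.toNat : Int)) := by omega
    have hk : (sum1 - 1).toNat = sum1.toNat - 1 := by omega
    rw [hk, hn, A_eq_P, foldl_range_P]
    have : sum1.toNat ≠ 0 := by omega
    rw [if_neg this]
    congr 1
    omega
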